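-- pv_equiv track=rewrite | github.com/MasteredChris/python | scacchi2.py | valutaMateriale
-- ===== SOURCE A (Python) =====
-- def calcolaPunti(pedina):
--     valori = {'p': 1, 'c': 3, 'a': 3, 't': 5, 'd': 9, 'r': 0}
--     return valori.get(pedina.lower(), 0)
--
-- def valutaMateriale(scacchiera):
--     puntiBianchi = 0
--     puntiNeri = 0
--     for riga in scacchiera:
--         for cella in riga:
--             for pedina in cella:
--                 if pedina.islower():
--                     puntiBianchi += calcolaPunti(pedina)
--                 elif pedina.isupper():
--                     puntiNeri += calcolaPunti(pedina)
--     if puntiBianchi > puntiNeri: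
--         return 1
--     elif puntiNeri > puntiBianchi:
--         return 2
--     else:
--         return 0
-- ===== SOURCE B (Python) =====
-- def calcolaPunti(pedina):
--     valori = {'p': 1, 'c': 3, 'a': 3, 't': 5, 'd': 9, 'r': 0}
--     return valori.get(pedina.lower(), 0)
--
-- def valutaMateriale(scacchiera):
--     pieces = [p for riga in scacchiera for cella in riga for p in cella]
--     counts = {}
--     for p in pieces:
--         counts[p] = counts.get(p, 0) + 1
--     puntiBianchi = sum(calcolaPunti(p) * c for p, c in counts.items() if p.islower())
--     puntiNeri = sum(calcolaPunti(p) * c for p, c in counts.items() if p.isupper())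
--     if puntiBianchi > puntiNeri:
--         return 1
--     elif puntiNeri > puntiBianchi:
--         return 2
--     else:
--         return 0
-- ===== Notes on version B (the rewrite author's own statement) =====
-- stated objective: alternative
-- what changed: B flattens the board into one piece list, tallies it into a counts dictionary, and computes both material totals from the (piece, count) table, instead of accumulating two running totals inline during a triple-nested scan of rows/cells.
import Mathlib
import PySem

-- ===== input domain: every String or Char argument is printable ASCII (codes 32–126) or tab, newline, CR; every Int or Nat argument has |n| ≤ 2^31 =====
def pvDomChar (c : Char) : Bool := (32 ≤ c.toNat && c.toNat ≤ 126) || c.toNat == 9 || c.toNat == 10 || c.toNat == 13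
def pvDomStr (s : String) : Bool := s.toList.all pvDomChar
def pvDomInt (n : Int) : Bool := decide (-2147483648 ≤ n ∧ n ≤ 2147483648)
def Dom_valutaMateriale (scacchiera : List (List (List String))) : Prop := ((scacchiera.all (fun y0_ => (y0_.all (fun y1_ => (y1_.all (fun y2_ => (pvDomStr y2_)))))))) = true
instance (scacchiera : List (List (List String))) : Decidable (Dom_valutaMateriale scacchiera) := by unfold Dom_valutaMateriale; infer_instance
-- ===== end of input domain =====

-- B tallies piece strings once into a counts dictionary built from the flattened board and computes
-- both totals from the (piece, count) table; same result, different decomposition (objective: alternative).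


-- shared module helper calcolaPunti (used by both Pythons verbatim)
def calcolaPunti (pedina : String) : Int :=
  let valori : PySem.Dict String Int :=
    (((((PySem.Dict.empty.insert "p" 1).insert "c" 3).insert "a" 3).insert "t" 5).insert "d" 9).insert "r" 0
  valori.getD (PySem.Str.lower pedina) 0

-- Python str.islower / str.isupper (exact on the ASCII domain: cased chars are the letters)
def pyStrIslower (s : String) : Bool :=
  s.toList.any (fun c => PySem.Chars.islower c || PySem.Chars.isupper c) &&
  s.toList.all (fun c => !PySem.Chars.isupper c)

def pyStrIsupper (s : String) : Bool :=
  s.toList.any (fun c => PySem.Chars.islower c || PySem.Chars.isupper c) &&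
  s.toList.all (fun c => !PySem.Chars.islower c)

-- ===== PORT A =====
def valutaMateriale (scacchiera : List (List (List String))) : Int :=
  let st : Int × Int :=
    scacchiera.foldl (fun st riga =>
      riga.foldl (fun st cella =>
        cella.foldl (fun st pedina =>
          if pyStrIslower pedina then (st.1 + calcolaPunti pedina, st.2)
          else if pyStrIsupper pedina then (st.1, st.2 + calcolaPunti pedina)
          else st) st) st) (0, 0)
  if st.1 > st.2 then 1 else if st.2 > st.1 then 2 else 0

-- ===== PORT B =====
def valutaMateriale_alt (scacchiera : List (List (List String))) : Int :=
  let pieces : List String := scacchiera.flatMap (fun riga => riga.flatMap (fun cella => cella))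
  let counts : PySem.Dict String Int :=
    pieces.foldl (fun d p => d.insert p (d.getD p 0 + 1)) PySem.Dict.empty
  let puntiBianchi : Int :=
    ((counts.items.filter (fun kv => pyStrIslower kv.1)).map (fun kv => calcolaPunti kv.1 * kv.2)).sum
  let puntiNeri : Int :=
    ((counts.items.filter (fun kv => pyStrIsupper kv.1)).map (fun kv => calcolaPunti kv.1 * kv.2)).sum
  if puntiBianchi > puntiNeri then 1 else if puntiNeri > puntiBianchi then 2 else 0

-- ===== PRECONDITION & SPEC =====
def Spec_valutaMateriale (scacchiera : List (List (List String))) (out : Int) : Prop := out = valutaMateriale_alt scacchiera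
instance (scacchiera : List (List (List String))) (out : Int) : Decidable (Spec_valutaMateriale scacchiera out) := by unfold Spec_valutaMateriale; infer_instance

-- ===== CLAIM (what is proved, stated in full; the proofs are below) =====
def Claim_equal_valutaMateriale : Prop := ∀ (scacchiera : List (List (List String))), Dom_valutaMateriale scacchiera → Spec_valutaMateriale scacchiera (valutaMateriale scacchiera)

-- ===== LEMMAS AND PROOFS =====

-- a string cannot be both islower and isupper
theorem not_lower_and_upper (s : String) (h : pyStrIslower s = true) : pyStrIsupper s = false := by
  unfold pyStrIslower at h
  unfold pyStrIsupper
  simp only [Bool.and_eq_true, List.any_eq_true, List.all_eq_true] at h ⊢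
  obtain ⟨⟨c, hc, hcased⟩, hnoup⟩ := h
  by_cases hb : (s.toList.all fun c => !PySem.Chars.islower c) = true
  · exfalso
    have h1 := hnoup c hc
    have h2 := (List.all_eq_true.mp hb) c hc
    simp_all
  · simp only [Bool.not_eq_true] at hb
    simp [hb]

-- the dual-accumulator fold over one cell
theorem inner_fold (cs : List String) (st : Int × Int) :
    cs.foldl (fun st pedina =>
      if pyStrIslower pedina then (st.1 + calcolaPunti pedina, st.2)
      else if pyStrIsupper pedina then (st.1, st.2 + calcolaPunti pedina)
      else st) st
    = (st.1 + ((cs.filter pyStrIslower).map calcolaPunti).sum,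
       st.2 + ((cs.filter pyStrIsupper).map calcolaPunti).sum) := by
  induction cs generalizing st with
  | nil => simp
  | cons x xs ih =>
    by_cases hl : pyStrIslower x = true
    · have hu := not_lower_and_upper x hl
      simp [List.foldl_cons, hl, hu, ih, add_assoc]
    · by_cases hu : pyStrIsupper x = true
      · simp [List.foldl_cons, hl, hu, ih, add_assoc]
      · simp [List.foldl_cons, hl, hu, ih]

theorem mid_fold (riga : List (List String)) (st : Int × Int) :
    riga.foldl (fun st cella =>
      cella.foldl (fun st pedina =>
        if pyStrIslower pedina then (st.1 + calcolaPunti pedina, st.2)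
        else if pyStrIsupper pedina then (st.1, st.2 + calcolaPunti pedina)
        else st) st) st
    = (st.1 + (((riga.flatMap id).filter pyStrIslower).map calcolaPunti).sum,
       st.2 + (((riga.flatMap id).filter pyStrIsupper).map calcolaPunti).sum) := by
  induction riga generalizing st with
  | nil => simp
  | cons c cs ih =>
    rw [List.foldl_cons, inner_fold, ih]
    simp [add_assoc]

theorem outer_fold (sc : List (List (List String))) (st : Int × Int) :
    sc.foldl (fun st riga =>
      riga.foldl (fun st cella =>
        cella.foldl (fun st pedina =>
          if pyStrIslower pedina then (st.1 + calcolaPunti pedina, st.2)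
          else if pyStrIsupper pedina then (st.1, st.2 + calcolaPunti pedina)
          else st) st) st) st
    = (st.1 + (((sc.flatMap (fun r => r.flatMap id)).filter pyStrIslower).map calcolaPunti).sum,
       st.2 + (((sc.flatMap (fun r => r.flatMap id)).filter pyStrIsupper).map calcolaPunti).sum) := by
  induction sc generalizing st with
  | nil => simp
  | cons r rs ih =>
    rw [List.foldl_cons, mid_fold, ih]
    simp [add_assoc]

-- indicator sum over a nodup list containing x
theorem sum_indicator {α : Type} [DecidableEq α] (g : α → Int) (ks : List α) (x : α)
    (hnd : ks.Nodup) (hx : x ∈ ks) :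
    (ks.map (fun k => if k = x then g k else 0)).sum = g x := by
  induction ks with
  | nil => simp at hx
  | cons a ks ih =>
    rw [List.map_cons, List.sum_cons]
    rcases List.nodup_cons.mp hnd with ⟨hna, hndk⟩
    rcases List.mem_cons.mp hx with h | h
    · subst h
      have hz : (ks.map (fun k => if k = x then g k else 0)).sum = 0 := by
        have hall : ∀ k ∈ ks, (if k = x then g k else 0) = 0 := by
          intro k hk
          have : k ≠ x := fun he => hna (he ▸ hk)
          simp [this]
        rw [List.map_congr_left hall]
        simp
      simp [hz]
    · have hax : a ≠ x := fun he => hna (he ▸ h)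
      simp [hax, ih hndk h]

-- sum of g(k) * count(k) over the distinct keys = direct sum of g over the list
theorem sum_mul_count {α : Type} [DecidableEq α] (g : α → Int) (ks xs : List α)
    (hnd : ks.Nodup) (hmem : ∀ x ∈ xs, x ∈ ks) :
    (ks.map (fun k => g k * (xs.count k : Int))).sum = (xs.map g).sum := by
  induction xs with
  | nil => simp
  | cons x xs ih =>
    have hx : x ∈ ks := hmem x (by simp)
    have hrest : ∀ y ∈ xs, y ∈ ks := fun y hy => hmem y (by simp [hy])
    have hsplit : ∀ k, g k * ((x :: xs).count k : Int)
        = g k * (xs.count k : Int) + (if k = x then g k else 0) := by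
      intro k
      rw [List.count_cons]
      by_cases hk : k = x
      · subst hk; simp; ring
      · simp [hk]
        exact Or.inl (fun he => hk he.symm)
    calc (ks.map (fun k => g k * ((x :: xs).count k : Int))).sum
        = (ks.map (fun k => g k * (xs.count k : Int) + (if k = x then g k else 0))).sum := by
          simp only [hsplit]
      _ = (ks.map (fun k => g k * (xs.count k : Int))).sum
          + (ks.map (fun k => if k = x then g k else 0)).sum := by
          rw [← List.sum_map_add]
      _ = (xs.map g).sum + g x := by rw [ih hrest, sum_indicator g ks x hnd hx]
      _ = ((x :: xs).map g).sum := by simp; ring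

-- B's filtered table sum equals the direct filtered sum over the flattened list
theorem table_sum (p : String → Bool) (xs : List String) :
    (((PySem.Dict.counter xs).items.filter (fun kv => p kv.1)).map
        (fun kv => calcolaPunti kv.1 * kv.2)).sum
    = ((xs.filter p).map calcolaPunti).sum := by
  rw [PySem.Dict.items_counter, List.filter_map, List.map_map]
  have hpred : ((fun kv : String × Int => p kv.1) ∘ (fun k => (k, (xs.count k : Int)))) = p := rfl
  rw [hpred]
  have h1 : ∀ k ∈ (PySem.Set.ofList xs).filter p,
      ((fun kv : String × Int => calcolaPunti kv.1 * kv.2) ∘ (fun k => (k, (xs.count k : Int)))) k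
      = calcolaPunti k * (((xs.filter p).count k : Int)) := by
    intro k hk
    have hpk : p k = true := (List.mem_filter.mp hk).2
    simp [Function.comp, List.count_filter, hpk]
  rw [List.map_congr_left h1]
  apply sum_mul_count
  · exact (PySem.Set.nodup_ofList xs).filter p
  · intro x hx
    rcases List.mem_filter.mp hx with ⟨hxm, hpx⟩
    exact List.mem_filter.mpr ⟨(PySem.Set.mem_ofList xs x).mpr hxm, hpx⟩

-- ===== VERDICT (by name: the statement is the Claim_ definition above) =====
theorem valutaMateriale_spec : Claim_equal_valutaMateriale := by
  intro sc _
  unfold Spec_valutaMateriale valutaMateriale valutaMateriale_alt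
  simp only [PySem.Dict.foldl_insert_getD_add_one_eq_counter, table_sum, outer_fold]
  simp [List.flatMap]
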